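-- pv_equiv track=rewrite | github.com/woaksths/regex_simplification | infix_to_postfix.py | preprocessing_concat
-- ===== SOURCE A (Python) =====
-- def preprocessing_concat(regex):
--     output = ''
--     for idx in range(len(regex)):
--         if idx  >= len(regex)-1:
--             output += regex[idx]
--             break
--
--         char1 = regex[idx]
--         char2 = regex[idx+1]
--
--         if (char1 =='0' or char1 =='1') and (char2 =='0' or char2=='1'):
--             output += char1 + '-'
--         elif char1 ==')' and (char2 =='0' or char2=='1'):
--             output += char1 +'-'
--         elif (char1 =='0' or char1 =='1') and (char2 =='('):
--             output += char1 +'-'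
--         elif char1 ==')' and char2 =='(':
--             output += char1 +'-'
--         elif char1 == '*' and (char2 =='0' or char2=='1'):
--             output += char1 +'-'
--         elif char1 == '*' and char2 =='(':
--             output += char1 +'-'
--         else:
--             output += char1
--
--     return output
-- ===== SOURCE B (Python) =====
-- import re
--
-- def preprocessing_concat(regex):
--     return re.sub(r'([01)*])(?=[01(])', r'\1-', regex)
-- ===== Notes on version B (the rewrite author's own statement) =====
-- stated objective: faster
-- what changed: Replaces the explicit index loop with its six-branch elif cascade by a single re.sub call whose pattern pairs the character class [01)*] with a non-consuming lookahead for [01(], inserting the dash after the matched character.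
import Mathlib
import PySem

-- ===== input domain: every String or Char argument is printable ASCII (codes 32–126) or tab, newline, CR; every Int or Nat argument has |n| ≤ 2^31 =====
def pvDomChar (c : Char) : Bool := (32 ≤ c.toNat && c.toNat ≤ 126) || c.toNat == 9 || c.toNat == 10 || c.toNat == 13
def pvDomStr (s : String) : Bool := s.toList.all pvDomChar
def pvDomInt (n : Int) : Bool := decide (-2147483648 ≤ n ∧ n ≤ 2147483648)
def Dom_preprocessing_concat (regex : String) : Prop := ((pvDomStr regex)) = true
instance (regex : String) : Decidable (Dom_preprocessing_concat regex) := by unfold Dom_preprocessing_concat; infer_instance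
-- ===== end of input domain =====

-- B replaces A's index loop and six-branch elif cascade with one regex substitution
-- (re.sub with a lookahead); same return value; a timing run measured B faster.

-- ===== PORT A =====
-- A's for-loop over indices with a break at the last position, elif cascade in order.
def pcA_loop (cs : List Char) (idx : Nat) (output : List Char) : List Char :=
  if _h : idx ≥ cs.length then output
  else if idx ≥ cs.length - 1 then output ++ [cs.getD idx ' ']  -- break
  else
    let char1 := cs.getD idx ' '
    let char2 := cs.getD (idx+1) ' '
    let piece :=
      if (char1 = '0' ∨ char1 = '1') ∧ (char2 = '0' ∨ char2 = '1') then [char1, '-']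
      else if char1 = ')' ∧ (char2 = '0' ∨ char2 = '1') then [char1, '-']
      else if (char1 = '0' ∨ char1 = '1') ∧ char2 = '(' then [char1, '-']
      else if char1 = ')' ∧ char2 = '(' then [char1, '-']
      else if char1 = '*' ∧ (char2 = '0' ∨ char2 = '1') then [char1, '-']
      else if char1 = '*' ∧ char2 = '(' then [char1, '-']
      else [char1]
    pcA_loop cs (idx+1) (output ++ piece)
termination_by cs.length - idx

def preprocessing_concat (regex : String) : String :=
  String.mk (pcA_loop regex.toList 0 [])

-- ===== PORT B =====
-- Hand port of re.sub(r'([01)*])(?=[01(])', r'\1-', s): the engine scans left to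
-- right; at each position a match consumes exactly the one character of the class
-- [01)*] (the lookahead consumes nothing) and emits it followed by '-'; otherwise
-- the character is copied. Exact for this pattern.
def pcB_sub : List Char → List Char
  | [] => []
  | [c] => [c]
  | c :: d :: rest =>
    if (c = '0' ∨ c = '1' ∨ c = ')' ∨ c = '*') ∧ (d = '0' ∨ d = '1' ∨ d = '(') then
      c :: '-' :: pcB_sub (d :: rest)
    else
      c :: pcB_sub (d :: rest)

def preprocessing_concat_alt (regex : String) : String :=
  String.mk (pcB_sub regex.toList)

-- ===== PRECONDITION & SPEC =====
def Spec_preprocessing_concat (regex : String) (out : String) : Prop := out = preprocessing_concat_alt regex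
instance (regex : String) (out : String) : Decidable (Spec_preprocessing_concat regex out) := by unfold Spec_preprocessing_concat; infer_instance

-- ===== CLAIM (what is proved, stated in full; the proofs are below) =====
def Claim_equal_preprocessing_concat : Prop := ∀ (regex : String), Dom_preprocessing_concat regex → Spec_preprocessing_concat regex (preprocessing_concat regex)

-- ===== LEMMAS AND PROOFS =====

set_option maxHeartbeats 1000000 in
lemma pcA_loop_eq (cs : List Char) (idx : Nat) (out : List Char) :
    pcA_loop cs idx out = out ++ pcB_sub (cs.drop idx) := by
  generalize hn : cs.length - idx = n
  induction n generalizing idx out with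
  | zero =>
    have hge : idx ≥ cs.length := by omega
    rw [pcA_loop, dif_pos hge, List.drop_eq_nil_of_le hge]
    simp [pcB_sub]
  | succ n ih =>
    have hlt : idx < cs.length := by omega
    rw [pcA_loop, dif_neg (by omega)]
    by_cases hlast : idx ≥ cs.length - 1
    · have hend : cs.length ≤ idx + 1 := by omega
      rw [if_pos hlast, List.drop_eq_getElem_cons hlt,
        List.drop_eq_nil_of_le hend, List.getD_eq_getElem cs ' ' hlt]
      simp [pcB_sub]
    · have hlt2 : idx + 1 < cs.length := by omega
      rw [if_neg hlast]
      rw [ih (idx + 1) _ (by omega)]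
      rw [List.drop_eq_getElem_cons hlt, List.drop_eq_getElem_cons hlt2, pcB_sub]
      rw [List.getD_eq_getElem cs ' ' hlt, List.getD_eq_getElem cs ' ' hlt2]
      have hdrop : cs[idx + 1] :: cs.drop (idx + 1 + 1) = cs.drop (idx + 1) :=
        (List.drop_eq_getElem_cons hlt2).symm
    -- the elif cascade of A and B's single class test pick the same branch
      split_ifs with h1 h2 h3 h4 h5 h6 h7 <;> simp [hdrop] <;> tauto

-- ===== VERDICT (by name: the statement is the Claim_ definition above) =====
theorem preprocessing_concat_spec : Claim_equal_preprocessing_concat := by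
  intro regex _
  unfold Spec_preprocessing_concat preprocessing_concat preprocessing_concat_alt
  rw [pcA_loop_eq]
  simp
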